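-- pv_equiv track=rewrite | github.com/ThawaniDev/posflutterapp | scripts/convert_pages.py | extract_param
-- ===== SOURCE A (Python) =====
-- def extract_param(src: str, key: str) -> tuple[int, int, str] | None:
--     """Find param `key: <value>` at top-level of the Scaffold(...) call.
--     Returns (start_idx_of_key, end_idx_past_value, value_text) or None."""
--     # Find `key:` at current level (caller must pass in a balanced region)
--     i = 0
--     depth = 0
--     in_str = None
--     while i < len(src):
--         c = src[i]
--         if in_str:
--             if c == '\\':
--                 i += 2; continue
--             if c == in_str: in_str = None
--             i += 1; continue
--         if c in ("'", '"'):
--             in_str = c; i += 1; continue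
--         if c in '([{': depth += 1
--         elif c in ')]}': depth -= 1
--         elif depth == 0 and src[i:i+len(key)+1] == f'{key}:' and (i == 0 or not src[i-1].isalnum() and src[i-1] != '_'):
--             # Skip whitespace
--             j = i + len(key) + 1
--             while j < len(src) and src[j] in ' \t\n': j += 1
--             # Value is everything until next top-level comma or end
--             vstart = j
--             vd = 0
--             vin = None
--             while j < len(src):
--                 cc = src[j]
--                 if vin:
--                     if cc == '\\': j += 2; continue
--                     if cc == vin: vin = None
--                     j += 1; continue
--                 if cc in ("'", '"'):
--                     vin = cc; j += 1; continue
--                 if cc in '([{': vd += 1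
--                 elif cc in ')]}':
--                     if vd == 0: break
--                     vd -= 1
--                 elif cc == ',' and vd == 0:
--                     break
--                 j += 1
--             return (i, j, src[vstart:j].strip())
--         i += 1
--     return None
-- ===== SOURCE B (Python) =====
-- def _value_end(src, j):
--     """Index just past the value starting at j: stops at the first top-level
--     comma or unbalanced closing bracket, tracking string literals and escapes."""
--     n = len(src)
--     vd, q = 0, None
--     while j < n:
--         c = src[j]
--         if q:
--             if c == '\\':
--                 j += 2  # skip the escaped character
--             else:
--                 if c == q:
--                     q = None
--                 j += 1
--         elif c in '\'"':
--             q = c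
--             j += 1
--         elif c in '([{':
--             vd += 1
--             j += 1
--         elif c in ')]}':
--             if vd == 0:
--                 return j
--             vd -= 1
--             j += 1
--         elif c == ',' and vd == 0:
--             return j
--         else:
--             j += 1
--     return j
--
--
-- def extract_param(src, key):
--     n = len(src)
--     pat = key + ':'
--     # Pass 1: table of positions that are plain top-level code characters
--     # (outside any string literal, at bracket depth 0, not a quote/bracket).
--     ok = [False] * n
--     q, depth, skip = None, 0, False
--     for i, c in enumerate(src):
--         if skip:
--             skip = False
--         elif q:
--             if c == '\\':
--                 skip = True
--             elif c == q:
--                 q = None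
--         elif c in '\'"':
--             q = c
--         elif c in '([{':
--             depth += 1
--         elif c in ')]}':
--             depth -= 1
--         elif depth == 0:
--             ok[i] = True
--     # Pass 2: first table-approved position where the pattern sits on a word boundary.
--     for i, flag in enumerate(ok):
--         if flag and src.startswith(pat, i) and \
--            (i == 0 or not (src[i - 1].isalnum() or src[i - 1] == '_')):
--             rest = src[i + len(pat):]
--             vstart = i + len(pat) + (len(rest) - len(rest.lstrip(' \t\n')))
--             j = _value_end(src, vstart)
--             return (i, j, src[vstart:j].strip())
--     return None
-- ===== Notes on version B (the rewrite author's own statement) =====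
-- stated objective: faster
-- what changed: A's single monolithic while-loop (which allocates a fresh slice src[i:i+len(key)+1] at every top-level index and tracks the scanner state inline) is replaced by a staged decomposition: pass 1 folds over the source once building a boolean table of positions that are at top level and outside string literals; pass 2 walks that table with an allocation-free startswith against a pattern built once, computes the value start by lstrip arithmetic, and delimits the value with a separate scanner.
import Mathlib
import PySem

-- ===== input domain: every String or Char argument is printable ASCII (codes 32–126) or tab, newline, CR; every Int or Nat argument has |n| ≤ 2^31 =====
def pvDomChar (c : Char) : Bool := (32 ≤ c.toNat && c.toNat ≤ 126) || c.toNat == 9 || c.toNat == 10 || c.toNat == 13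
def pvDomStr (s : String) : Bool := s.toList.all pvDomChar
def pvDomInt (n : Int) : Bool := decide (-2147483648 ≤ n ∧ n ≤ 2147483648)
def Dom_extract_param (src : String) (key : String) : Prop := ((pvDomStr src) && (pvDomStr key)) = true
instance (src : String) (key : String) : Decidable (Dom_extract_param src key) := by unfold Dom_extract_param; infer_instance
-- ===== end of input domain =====

-- B replaces A's single monolithic scan by a staged decomposition: pass 1 folds over the source
-- once building a table of top-level out-of-string positions; pass 2 searches that table for the
-- key on a word boundary (objective: alternative decomposition; same return value everywhere).

-- ===== PORT A =====
-- A's inner `while j < len(src)` value loop (may return src.length + 1 after a trailing escape, as Python does)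
def pvLoopVA (src : List Char) (j : Nat) (vd : Int) (vin : Option Char) : Nat :=
  if h : j < src.length then
    let cc := src[j]
    match vin with
    | some q =>
      if cc = '\\' then pvLoopVA src (j+2) vd (some q)
      else pvLoopVA src (j+1) vd (if cc = q then none else some q)
    | none =>
      if cc = '\'' ∨ cc = '"' then pvLoopVA src (j+1) vd (some cc)
      else if cc = '(' ∨ cc = '[' ∨ cc = '{' then pvLoopVA src (j+1) (vd+1) none
      else if cc = ')' ∨ cc = ']' ∨ cc = '}' then
        (if vd = 0 then j else pvLoopVA src (j+1) (vd-1) none)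
      else if cc = ',' ∧ vd = 0 then j
      else pvLoopVA src (j+1) vd none
  else j
termination_by src.length - j
decreasing_by all_goals omega

-- A's `while j < len(src) and src[j] in ' \t\n'` whitespace skip
def pvSkipWsA (src : List Char) (j : Nat) : Nat :=
  if h : j < src.length then
    if src[j] = ' ' ∨ src[j] = '\t' ∨ src[j] = '\n' then pvSkipWsA src (j+1) else j
  else j
termination_by src.length - j

-- A's outer `while i < len(src)` scan (src[i-1] is only read with 1 ≤ i < len, so getD is exact)
def pvLoopA (src : List Char) (key : List Char) (i : Nat) (depth : Int) (inStr : Option Char) :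
    Option (Int × Int × String) :=
  if h : i < src.length then
    let c := src[i]
    match inStr with
    | some q =>
      if c = '\\' then pvLoopA src key (i+2) depth (some q)
      else pvLoopA src key (i+1) depth (if c = q then none else some q)
    | none =>
      if c = '\'' ∨ c = '"' then pvLoopA src key (i+1) depth (some c)
      else if c = '(' ∨ c = '[' ∨ c = '{' then pvLoopA src key (i+1) (depth+1) none
      else if c = ')' ∨ c = ']' ∨ c = '}' then pvLoopA src key (i+1) (depth-1) none
      else if depth = 0 ∧
          PySem.List.slice src (some (i:Int)) (some ((i + key.length + 1 : Nat) : Int)) = key ++ [':'] ∧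
          (i = 0 ∨ (¬ PySem.Chars.isalnum (src.getD (i-1) ' ') = true ∧ src.getD (i-1) ' ' ≠ '_')) then
        let j0 := pvSkipWsA src (i + key.length + 1)
        let jend := pvLoopVA src j0 0 none
        some ((i:Int), (jend:Int),
          String.ofList (PySem.Chars.strip (PySem.List.slice src (some (j0:Int)) (some (jend:Int)))))
      else pvLoopA src key (i+1) depth none
  else none
termination_by src.length - i
decreasing_by all_goals omega

def extract_param (src : String) (key : String) : Option (Int × Int × String) :=
  pvLoopA src.toList key.toList 0 0 none

-- ===== PORT B =====
-- character classes B tests with `c in '…'`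
def pvQuotes : List Char := ['\'', '"']
def pvOpens : List Char := ['(', '[', '{']
def pvCloses : List Char := [')', ']', '}']
def pvWsB : List Char := [' ', '\t', '\n']

-- one step of B's pass-1 scanner state (q, depth, skip) — the body of B's first for-loop
def pvStep (st : Option Char × Int × Bool) (c : Char) : Option Char × Int × Bool :=
  if st.2.2 then (st.1, st.2.1, false)
  else match st.1 with
    | some q =>
      if c = '\\' then (some q, st.2.1, true)
      else ((if c = q then none else some q), st.2.1, false)
    | none =>
      if pvQuotes.contains c then (some c, st.2.1, false)
      else if pvOpens.contains c then (none, st.2.1 + 1, false)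
      else if pvCloses.contains c then (none, st.2.1 - 1, false)
      else (none, st.2.1, false)

-- the ok flag B's pass 1 records at a position with state st seeing char c
def pvOkFlag (st : Option Char × Int × Bool) (c : Char) : Bool :=
  !st.2.2 && st.1.isNone && !pvQuotes.contains c && !pvOpens.contains c &&
    !pvCloses.contains c && decide (st.2.1 = 0)

-- B pass 1: the ok table, one fold over src
def pvBuildOk (src : List Char) : List Bool :=
  (src.foldl (fun (p : List Bool × (Option Char × Int × Bool)) c =>
      (p.1 ++ [pvOkFlag p.2 c], pvStep p.2 c)) ([], (none, 0, false))).1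

-- `len(rest) - len(rest.lstrip(' \t\n'))`: the count of leading whitespace characters
def pvLeadWs : List Char → Nat
  | [] => 0
  | c :: r => if pvWsB.contains c then pvLeadWs r + 1 else 0

-- B's _value_end: forward scan consuming the remaining characters (two on an escape)
def pvValB : List Char → Nat → Int → Option Char → Nat
  | [], j, _, _ => j
  | c :: rest, j, vd, q =>
    match q with
    | some qq =>
      if c = '\\' then
        match rest with
        | [] => j + 2
        | _ :: rest' => pvValB rest' (j + 2) vd (some qq)
      else pvValB rest (j + 1) vd (if c = qq then none else some qq)
    | none =>
      if pvQuotes.contains c then pvValB rest (j + 1) vd (some c)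
      else if pvOpens.contains c then pvValB rest (j + 1) (vd + 1) none
      else if pvCloses.contains c then
        (if vd = 0 then j else pvValB rest (j + 1) (vd - 1) none)
      else if c = ',' ∧ vd = 0 then j
      else pvValB rest (j + 1) vd none

-- B pass 2 body: does position i match, and if so the result built from it
-- (src.startswith(pat, i) with 0 ≤ i is exactly startswith on the drop; src[i-1] only read with 1 ≤ i)
def pvHit (src key : List Char) (ok : List Bool) (i : Nat) : Option (Int × Int × String) :=
  if ok.getD i false = true ∧
     PySem.Chars.startswith (src.drop i) (key ++ [':']) = true ∧
     (i = 0 ∨ ¬(PySem.Chars.isalnum (src.getD (i-1) ' ') = true ∨ src.getD (i-1) ' ' = '_')) then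
    let vstart := i + (key ++ [':']).length + pvLeadWs (src.drop (i + (key ++ [':']).length))
    let jend := pvValB (src.drop vstart) vstart 0 none
    some ((i:Int), (jend:Int),
      String.ofList (PySem.Chars.strip (PySem.List.slice src (some (vstart:Int)) (some (jend:Int)))))
  else none

-- B pass 2: first matching position, `for i, flag in enumerate(ok): … return …`
def extract_param_alt (src : String) (key : String) : Option (Int × Int × String) :=
  (List.range src.toList.length).findSome? (pvHit src.toList key.toList (pvBuildOk src.toList))

-- ===== PRECONDITION & SPEC =====
def Spec_extract_param (src : String) (key : String) (out : Option (Int × Int × String)) : Prop := out = extract_param_alt src key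
instance (src : String) (key : String) (out : Option (Int × Int × String)) : Decidable (Spec_extract_param src key out) := by unfold Spec_extract_param; infer_instance

-- ===== CLAIM (what is proved, stated in full; the proofs are below) =====
def Claim_equal_extract_param : Prop := ∀ (src : String) (key : String), Dom_extract_param src key → Spec_extract_param src key (extract_param src key)

-- ===== LEMMAS AND PROOFS =====


theorem pvWsB_iff (x : Char) : pvWsB.contains x = true ↔ (x = ' ' ∨ x = '\t' ∨ x = '\n') := by
  simp [pvWsB]

theorem pvQuotes_iff (x : Char) : pvQuotes.contains x = true ↔ (x = '\'' ∨ x = '"') := by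
  simp [pvQuotes]

theorem pvOpens_iff (x : Char) : pvOpens.contains x = true ↔ (x = '(' ∨ x = '[' ∨ x = '{') := by
  simp [pvOpens]

theorem pvCloses_iff (x : Char) : pvCloses.contains x = true ↔ (x = ')' ∨ x = ']' ∨ x = '}') := by
  simp [pvCloses]

-- B's lstrip arithmetic equals A's whitespace-skip loop
theorem pvLead_eq (src : List Char) :
    ∀ j, j ≤ src.length → j + pvLeadWs (src.drop j) = pvSkipWsA src j := by
  have : ∀ k j, src.length - j ≤ k → j ≤ src.length →
      j + pvLeadWs (src.drop j) = pvSkipWsA src j := by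
    intro k
    induction k with
    | zero =>
      intro j hk hj
      have hj' : j = src.length := by omega
      rw [pvSkipWsA]
      simp [hj', pvLeadWs]
    | succ k ih =>
      intro j hk hj
      rw [pvSkipWsA]
      by_cases h : j < src.length
      · rw [dif_pos h]
        have hdrop : src.drop j = src[j] :: src.drop (j+1) := List.drop_eq_getElem_cons h
        rw [hdrop]
        by_cases hw : src[j] = ' ' ∨ src[j] = '\t' ∨ src[j] = '\n'
        · rw [if_pos hw]
          have hc : pvWsB.contains src[j] = true := (pvWsB_iff _).mpr hw
          simp only [pvLeadWs]
          rw [hc, if_pos rfl, ← ih (j+1) (by omega) (by omega)]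
          omega
        · rw [if_neg hw]
          have hc : pvWsB.contains src[j] = false := by
            rw [Bool.eq_false_iff]; intro hcon; exact hw ((pvWsB_iff _).mp hcon)
          simp only [pvLeadWs]
          rw [hc]
          simp
      · rw [dif_neg h]
        have hj' : j = src.length := by omega
        simp [hj', pvLeadWs]
  intro j hj; exact this (src.length - j) j le_rfl hj

-- the whitespace skip never moves past the end when it starts at or before it
theorem pvSkipWsA_le (src : List Char) : ∀ j, j ≤ src.length → pvSkipWsA src j ≤ src.length := by
  have : ∀ k j, src.length - j ≤ k → j ≤ src.length → pvSkipWsA src j ≤ src.length := by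
    intro k
    induction k with
    | zero =>
      intro j hk hj
      rw [pvSkipWsA]
      split
      · split
        · omega
        · omega
      · omega
    | succ k ih =>
      intro j hk hj
      rw [pvSkipWsA]
      split
      · split
        · exact ih (j+1) (by omega) (by omega)
        · omega
      · omega
  intro j hj; exact this (src.length - j) j le_rfl hj

-- B's value-end scan over the remaining characters computes A's value-end loop
theorem pvVal_eq (src : List Char) :
    ∀ j vd q, j ≤ src.length → pvValB (src.drop j) j vd q = pvLoopVA src j vd q := by
  have : ∀ k j vd q, src.length - j ≤ k → j ≤ src.length →
      pvValB (src.drop j) j vd q = pvLoopVA src j vd q := by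
    intro k
    induction k with
    | zero =>
      intro j vd q hk hj
      have hj' : j = src.length := by omega
      rw [pvLoopVA, dif_neg (by omega)]
      simp [hj', pvValB]
    | succ k ih =>
      intro j vd q hk hj
      by_cases h : j < src.length
      · have hdrop : src.drop j = src[j] :: src.drop (j+1) := List.drop_eq_getElem_cons h
        rw [pvLoopVA, dif_pos h, hdrop, pvValB.eq_def]
        match q with
        | some qq =>
          by_cases hc : src[j] = '\\'
          · by_cases h2 : j + 1 < src.length
            · rw [List.drop_eq_getElem_cons h2]
              simp [hc]
              exact ih (j+2) vd (some qq) (by omega) (by omega)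
            · have hnil : src.drop (j+1) = [] := List.drop_eq_nil_of_le (by omega)
              rw [hnil]
              simp [hc]
              rw [pvLoopVA, dif_neg (show ¬ j + 2 < src.length by omega)]
          · simp [hc]
            exact ih (j+1) vd (if src[j] = qq then none else some qq) (by omega) (by omega)
        | none =>
          by_cases h1 : src[j] = '\'' ∨ src[j] = '"'
          · rcases h1 with h1 | h1 <;>
              · simp [pvQuotes, pvOpens, pvCloses, h1]
                exact ih (j+1) vd (some _) (by omega) (by omega)
          · have hm1 : src[j] ∉ pvQuotes := by
              intro hcon; exact h1 ((pvQuotes_iff _).mp (by simpa using hcon))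
            by_cases h2 : src[j] = '(' ∨ src[j] = '[' ∨ src[j] = '{'
            · rcases h2 with h2 | h2 | h2 <;>
                · simp [pvQuotes, pvOpens, pvCloses, h2]
                  exact ih (j+1) (vd+1) none (by omega) (by omega)
            · have hm2 : src[j] ∉ pvOpens := by
                intro hcon; exact h2 ((pvOpens_iff _).mp (by simpa using hcon))
              by_cases h3 : src[j] = ')' ∨ src[j] = ']' ∨ src[j] = '}'
              · rcases h3 with h3 | h3 | h3 <;>
                  · simp [pvQuotes, pvOpens, pvCloses, h3]
                    by_cases hv : vd = 0
                    · simp [hv]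
                    · simp [hv]
                      exact ih (j+1) (vd-1) none (by omega) (by omega)
              · have hm3 : src[j] ∉ pvCloses := by
                  intro hcon; exact h3 ((pvCloses_iff _).mp (by simpa using hcon))
                by_cases h4 : src[j] = ',' ∧ vd = 0
                · simp [pvQuotes, pvOpens, pvCloses, h4.1, h4.2, h1, h2, h3]
                · simp [hm1, hm2, hm3, h1, h2, h3, h4]
                  exact ih (j+1) vd none (by omega) (by omega)
      · have hj' : j = src.length := by omega
        rw [pvLoopVA, dif_neg h]
        simp [hj', pvValB]
  intro j vd q hj; exact this (src.length - j) j vd q le_rfl hj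

-- proof-side recursion computing B's ok table position by position
def pvOkGo (l : List Char) (st : Option Char × Int × Bool) : List Bool :=
  match l with
  | [] => []
  | c :: cs => pvOkFlag st c :: pvOkGo cs (pvStep st c)

theorem pvBuildOk_foldl (l : List Char) :
    ∀ acc st, (l.foldl (fun (p : List Bool × (Option Char × Int × Bool)) c =>
      (p.1 ++ [pvOkFlag p.2 c], pvStep p.2 c)) (acc, st)).1 = acc ++ pvOkGo l st := by
  induction l with
  | nil => intro acc st; simp [pvOkGo]
  | cons c cs ih =>
    intro acc st
    simp only [List.foldl_cons, pvOkGo]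
    rw [ih]
    simp

theorem pvBuildOk_eq (src : List Char) : pvBuildOk src = pvOkGo src (none, 0, false) := by
  unfold pvBuildOk
  rw [pvBuildOk_foldl]
  simp

theorem pvOkGo_getD (l : List Char) :
    ∀ st i, i < l.length →
      (pvOkGo l st).getD i false = pvOkFlag (List.foldl pvStep st (l.take i)) (l.getD i ' ') := by
  induction l with
  | nil => intro st i h; simp at h
  | cons c cs ih =>
    intro st i h
    cases i with
    | zero => simp [pvOkGo]
    | succ i =>
      simp only [pvOkGo, List.getD_cons_succ, List.take_succ_cons, List.foldl_cons]
      exact ih (pvStep st c) i (by simpa using h)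

-- startswith-from-i equals A's slice comparison
theorem pvStartswith_iff (src : List Char) (pat : List Char) (i : Nat) :
    PySem.Chars.startswith (src.drop i) pat = true ↔
      PySem.List.slice src (some (i:Int)) (some ((i + pat.length : Nat) : Int)) = pat := by
  rw [PySem.List.slice_natCast]
  have : i + pat.length - i = pat.length := by omega
  rw [this]
  simp only [PySem.Chars.startswith, List.isPrefixOf_iff_prefix]
  constructor
  · intro hp; exact (List.prefix_iff_eq_take.mp hp).symm
  · intro hp; exact List.prefix_iff_eq_take.mpr hp.symm

-- the main induction: when B's pass-1 state after i characters is (q, d, false),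
-- B's table search from i computes A's scan from i with state (d, q)
theorem pvMain (src key : List Char) :
    ∀ k i d q, src.length - i ≤ k →
      List.foldl pvStep (none, 0, false) (src.take i) = (q, d, false) →
      (List.range' i (src.length - i)).findSome?
          (pvHit src key (pvOkGo src (none, 0, false)))
        = pvLoopA src key i d q := by
  intro k
  induction k with
  | zero =>
    intro i d q hk hst
    rw [pvLoopA]
    have h0 : src.length - i = 0 := by omega
    rw [h0, dif_neg (by omega)]
    simp [List.range']
  | succ k ih =>
    intro i d q hk hst
    by_cases h : i < src.length
    · have hsplit : src.length - i = (src.length - (i+1)) + 1 := by omega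
      rw [hsplit, List.range'_succ, List.findSome?_cons]
      have htake : src.take (i+1) = src.take i ++ [src[i]] := by
        rw [List.take_add_one]
        simp [List.getElem?_eq_getElem h]
      have hgetD : src.getD i ' ' = src[i] := List.getD_eq_getElem src ' ' h
      have hok : (pvOkGo src (none, 0, false)).getD i false
          = pvOkFlag (q, d, false) (src[i]) := by
        rw [pvOkGo_getD src _ i h, hst, hgetD]
      rw [pvLoopA, dif_pos h]
      match hq : q with
      | some qc =>
        have hflag : pvOkFlag ((some qc : Option Char), d, false) (src[i]) = false := by
          simp [pvOkFlag]
        have hhit : pvHit src key (pvOkGo src (none, 0, false)) i = none := by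
          rw [pvHit, if_neg]
          intro hcon
          rw [hok, hflag] at hcon
          exact absurd hcon.1 (by simp)
        rw [hhit]
        by_cases hc : src[i] = '\\'
        · have hst1 : List.foldl pvStep (none, 0, false) (src.take (i+1))
              = (some qc, d, true) := by
            rw [htake, List.foldl_append, hst]
            simp [pvStep, hc]
          by_cases h1 : i + 1 < src.length
          · have hsplit1 : src.length - (i+1) = (src.length - (i+2)) + 1 := by omega
            rw [hsplit1, List.range'_succ, List.findSome?_cons]
            have hok1 : (pvOkGo src (none, 0, false)).getD (i+1) false
                = pvOkFlag ((some qc : Option Char), d, true) (src[i+1]) := by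
              rw [pvOkGo_getD src _ (i+1) h1, hst1, List.getD_eq_getElem src ' ' h1]
            have hflag1 : pvOkFlag ((some qc : Option Char), d, true) (src[i+1]) = false := by
              simp [pvOkFlag]
            have hhit1 : pvHit src key (pvOkGo src (none, 0, false)) (i+1) = none := by
              rw [pvHit, if_neg]
              intro hcon
              rw [hok1, hflag1] at hcon
              exact absurd hcon.1 (by simp)
            rw [hhit1]
            have htake2 : src.take (i+2) = src.take (i+1) ++ [src[i+1]] := by
              rw [List.take_add_one]
              simp [List.getElem?_eq_getElem h1]
            have hrec := ih (i+2) d (some qc) (by omega)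
              (by rw [htake2, List.foldl_append, hst1]; simp [pvStep])
            simp only [hc]
            simp
            rw [show i + 1 + 1 = i + 2 by omega]
            exact hrec
          · have h0 : src.length - (i+1) = 0 := by omega
            rw [h0]
            simp only [hc]
            simp [List.range']
            rw [pvLoopA, dif_neg (show ¬ i + 2 < src.length by omega)]
        · have hrec := ih (i+1) d (if src[i] = qc then none else some qc) (by omega)
            (by rw [htake, List.foldl_append, hst]; simp [pvStep, hc])
          simp [hc]
          exact hrec
      | none =>
        by_cases h1 : src[i] = '\'' ∨ src[i] = '"'
        · have hm : src[i] ∈ pvQuotes := by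
            rcases h1 with h1 | h1 <;> simp [pvQuotes, h1]
          have hflag : pvOkFlag ((none : Option Char), d, false) (src[i]) = false := by
            simp [pvOkFlag, hm]
          have hhit : pvHit src key (pvOkGo src (none, 0, false)) i = none := by
            rw [pvHit, if_neg]
            intro hcon
            rw [hok, hflag] at hcon
            exact absurd hcon.1 (by simp)
          rw [hhit]
          have hbs : src[i] ≠ '\\' := by rcases h1 with h1 | h1 <;> simp [h1]
          have hrec := ih (i+1) d (some src[i]) (by omega)
            (by rw [htake, List.foldl_append, hst]
                simp only [List.foldl_cons, List.foldl_nil, pvStep]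
                simp [hm, hbs])
          simp [h1]
          exact hrec
        · have hm1 : src[i] ∉ pvQuotes := by
            intro hcon; exact h1 ((pvQuotes_iff _).mp (by simpa using hcon))
          by_cases h2 : src[i] = '(' ∨ src[i] = '[' ∨ src[i] = '{'
          · have hm : src[i] ∈ pvOpens := by
              rcases h2 with h2 | h2 | h2 <;> simp [pvOpens, h2]
            have hflag : pvOkFlag ((none : Option Char), d, false) (src[i]) = false := by
              simp [pvOkFlag, hm]
            have hhit : pvHit src key (pvOkGo src (none, 0, false)) i = none := by
              rw [pvHit, if_neg]
              intro hcon
              rw [hok, hflag] at hcon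
              exact absurd hcon.1 (by simp)
            rw [hhit]
            have hrec := ih (i+1) (d+1) none (by omega)
              (by rw [htake, List.foldl_append, hst]
                  simp only [List.foldl_cons, List.foldl_nil, pvStep]
                  simp [hm1, hm])
            simp [h1, h2]
            exact hrec
          · have hm2 : src[i] ∉ pvOpens := by
              intro hcon; exact h2 ((pvOpens_iff _).mp (by simpa using hcon))
            by_cases h3 : src[i] = ')' ∨ src[i] = ']' ∨ src[i] = '}'
            · have hm : src[i] ∈ pvCloses := by
                rcases h3 with h3 | h3 | h3 <;> simp [pvCloses, h3]
              have hflag : pvOkFlag ((none : Option Char), d, false) (src[i]) = false := by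
                simp [pvOkFlag, hm]
              have hhit : pvHit src key (pvOkGo src (none, 0, false)) i = none := by
                rw [pvHit, if_neg]
                intro hcon
                rw [hok, hflag] at hcon
                exact absurd hcon.1 (by simp)
              rw [hhit]
              have hrec := ih (i+1) (d-1) none (by omega)
                (by rw [htake, List.foldl_append, hst]
                    simp only [List.foldl_cons, List.foldl_nil, pvStep]
                    simp [hm1, hm2, hm])
              simp [h1, h2, h3]
              exact hrec
            · have hm3 : src[i] ∉ pvCloses := by
                intro hcon; exact h3 ((pvCloses_iff _).mp (by simpa using hcon))
              have hflag : pvOkFlag ((none : Option Char), d, false) (src[i])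
                  = decide (d = 0) := by
                simp [pvOkFlag, hm1, hm2, hm3]
              have hsw := pvStartswith_iff src (key ++ [':']) i
              have hlen : (key ++ [':']).length = key.length + 1 := by simp
              rw [hlen] at hsw
              have hnext : List.foldl pvStep (none, 0, false) (src.take (i+1))
                  = ((none : Option Char), d, false) := by
                rw [htake, List.foldl_append, hst]
                simp only [List.foldl_cons, List.foldl_nil, pvStep]
                simp [hm1, hm2, hm3]
              by_cases hd : d = 0
              · by_cases hswc : PySem.Chars.startswith (List.drop i src) (key ++ [':']) = true
                · by_cases hb : i = 0 ∨ ¬(PySem.Chars.isalnum (src.getD (i-1) ' ') = true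
                      ∨ src.getD (i-1) ' ' = '_')
                  · have hA : (d = 0 ∧
                        PySem.List.slice src (some (i:Int)) (some ((i + key.length + 1 : Nat) : Int)) = key ++ [':'] ∧
                        (i = 0 ∨ (¬ PySem.Chars.isalnum (src.getD (i-1) ' ') = true ∧ src.getD (i-1) ' ' ≠ '_'))) := by
                      exact ⟨hd, hsw.mp hswc, by tauto⟩
                    have hB : ((pvOkGo src (none, 0, false)).getD i false = true ∧
                        PySem.Chars.startswith (src.drop i) (key ++ [':']) = true ∧
                        (i = 0 ∨ ¬(PySem.Chars.isalnum (src.getD (i-1) ' ') = true ∨ src.getD (i-1) ' ' = '_'))) := by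
                      exact ⟨by rw [hok, hflag]; simp [hd], hswc, hb⟩
                    rw [pvHit, if_pos hB]
                    have hfit : i + key.length + 1 ≤ src.length := by
                      have := List.IsPrefix.length_le
                        (List.isPrefixOf_iff_prefix.mp hswc)
                      simp [List.length_drop] at this
                      omega
                    have hvs : i + (key ++ [':']).length +
                        pvLeadWs (src.drop (i + (key ++ [':']).length))
                        = pvSkipWsA src (i + key.length + 1) := by
                      rw [hlen, show i + (key.length + 1) = i + key.length + 1 by omega]
                      exact pvLead_eq src (i + key.length + 1) hfit
                    simp only [hvs, pvVal_eq src _ 0 none (pvSkipWsA_le src _ hfit)]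
                    simp [h1, h2, h3, hA, hd]
                    intro hcon
                    rcases hcon (by exact_mod_cast hA.2.1) with ⟨hne0, himp⟩
                    rcases hA.2.2 with h0 | ⟨hna, hnu⟩
                    · exact absurd h0 hne0
                    · exact absurd (himp (by simpa using hna)) (by simpa using hnu)
                  · have hhit : pvHit src key (pvOkGo src (none, 0, false)) i = none := by
                      rw [pvHit, if_neg]; intro hcon; exact hb hcon.2.2
                    rw [hhit, if_neg (by intro hcon; exact hb (by tauto))]
                    simpa [h1, h2, h3] using ih (i+1) d none (by omega) hnext
                · have hhit : pvHit src key (pvOkGo src (none, 0, false)) i = none := by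
                    rw [pvHit, if_neg]; intro hcon; exact hswc hcon.2.1
                  rw [hhit, if_neg (by intro hcon; exact hswc (hsw.mpr hcon.2.1))]
                  simpa [h1, h2, h3] using ih (i+1) d none (by omega) hnext
              · have hhit : pvHit src key (pvOkGo src (none, 0, false)) i = none := by
                  rw [pvHit, if_neg]
                  intro hcon
                  rw [hok, hflag] at hcon
                  exact hd (by simpa using hcon.1)
                rw [hhit, if_neg (by tauto)]
                simpa [h1, h2, h3] using ih (i+1) d none (by omega) hnext
    · rw [pvLoopA, dif_neg h]
      have h0 : src.length - i = 0 := by omega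
      rw [h0]
      simp [List.range']

-- ===== VERDICT (by name: the statement is the Claim_ definition above) =====
theorem extract_param_spec : Claim_equal_extract_param := by
  intro src key _
  unfold Spec_extract_param extract_param extract_param_alt
  rw [pvBuildOk_eq, List.range_eq_range']
  have := pvMain src.toList key.toList src.toList.length 0 0 none (by omega) (by simp)
  simpa using this.symm
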